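-- pv_equiv track=rewrite | github.com/Alf4ed/Comedian-Timetabler | Comedian-Timetabler.py | isConsistentTask2
-- ===== SOURCE A (Python) =====
-- def isConsistentTask2(assignment, showType, comedian, day):
-- 	# Returns False if the comedian would perform for more than 4 hours in the week
-- 	# Returns False if the comedian would perform for more than 2 hours in a day
-- 	# Returns False if any day has more than 10 slots assigned
-- 	showCosts = {"main": 2, "test": 1}
-- 	showsPerWeek = 0
-- 	showsPerDay = 0
-- 	maxOnDay = 0
--
-- 	showsPerWeek += showCosts[showType]
-- 	showsPerDay += showCosts[showType]
--
-- 	for show in assignment: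
-- 		if show[0] == day:
-- 			maxOnDay += 1
-- 			if maxOnDay >= 10:
-- 				return False
-- 		if show[1] == comedian:
-- 			showsPerWeek += showCosts[show[3]]
-- 			if showsPerWeek > 4:
-- 				return False
--
-- 			if show[0] == day:
-- 				showsPerDay += showCosts[show[3]]
-- 				if showsPerDay > 2:
-- 					return False
--
-- 	return True
-- ===== SOURCE B (Python) =====
-- def isConsistentTask2(assignment, showType, comedian, day):
--     showCosts = {"main": 2, "test": 1}
--     day_slots = sum(1 for show in assignment if show[0] == day)
--     week = showCosts[showType] + sum(showCosts[show[3]] for show in assignment if show[1] == comedian)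
--     on_day = showCosts[showType] + sum(showCosts[show[3]] for show in assignment
--                                        if show[1] == comedian and show[0] == day)
--     return day_slots < 10 and week <= 4 and on_day <= 2
-- ===== Notes on version B (the rewrite author's own statement) =====
-- stated objective: simpler
-- what changed: Replaces A's single interleaved early-exit loop over three mutable accumulators with three independent aggregate scans (day-slot count, comedian week cost, comedian day cost) combined in one final boolean conjunction; equivalent because all cost increments are positive, so a threshold is ever exceeded iff the final total exceeds it.
import Mathlib
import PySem

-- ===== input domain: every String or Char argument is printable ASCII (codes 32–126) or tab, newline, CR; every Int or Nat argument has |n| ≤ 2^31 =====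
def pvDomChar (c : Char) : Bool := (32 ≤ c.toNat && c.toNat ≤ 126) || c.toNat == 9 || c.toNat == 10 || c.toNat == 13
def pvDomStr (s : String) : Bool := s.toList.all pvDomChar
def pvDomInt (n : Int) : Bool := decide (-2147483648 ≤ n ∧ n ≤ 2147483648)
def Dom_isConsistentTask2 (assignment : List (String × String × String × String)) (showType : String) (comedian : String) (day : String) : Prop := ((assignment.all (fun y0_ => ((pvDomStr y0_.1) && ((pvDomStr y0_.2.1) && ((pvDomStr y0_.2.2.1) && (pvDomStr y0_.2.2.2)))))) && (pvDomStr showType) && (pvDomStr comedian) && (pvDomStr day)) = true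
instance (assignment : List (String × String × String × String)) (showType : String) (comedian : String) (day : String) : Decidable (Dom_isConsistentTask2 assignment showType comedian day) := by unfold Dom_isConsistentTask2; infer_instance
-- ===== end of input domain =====

-- ===== PORT A =====
-- B changes only the decomposition (three independent aggregate scans instead of one
-- interleaved early-exit loop); same O(n) cost, return value proved equal on Pre_.

-- showCosts = {"main": 2, "test": 1}
def showCosts : PySem.Dict String Int := PySem.Dict.ofList [("main", 2), ("test", 1)]

-- the body of A's for-loop, carrying (showsPerWeek, showsPerDay, maxOnDay);
-- a missing show-type key is Python's KeyError: get? = none, rendered false here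
-- (exactly those inputs are excluded by Pre_isConsistentTask2 below)
def aLoop (comedian day : String) (l : List (String × String × String × String))
    (spw spd mon : Int) : Bool :=
  match l with
  | [] => true
  | shw :: rest =>
    let mon' := if shw.1 == day then mon + 1 else mon
    if shw.1 == day && decide (mon' ≥ 10) then false
    else if shw.2.1 == comedian then
      match PySem.Dict.get? showCosts shw.2.2.2 with
      | none => false  -- KeyError (outside Pre_)
      | some c =>
        let spw' := spw + c
        if spw' > 4 then false
        else if shw.1 == day then
          let spd' := spd + c
          if spd' > 2 then false else aLoop comedian day rest spw' spd' mon'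
        else aLoop comedian day rest spw' spd mon'
    else aLoop comedian day rest spw spd mon'

def isConsistentTask2 (assignment : List (String × String × String × String)) (showType : String) (comedian : String) (day : String) : Bool :=
  match PySem.Dict.get? showCosts showType with
  | none => false  -- KeyError (outside Pre_)
  | some c0 => aLoop comedian day assignment c0 c0 0

-- ===== PORT B =====
-- Python B indexes showCosts[...] (KeyError outside Pre_); ported as getD with default 0,
-- which agrees with the Python wherever Pre_ holds.
def isConsistentTask2_alt (assignment : List (String × String × String × String)) (showType : String) (comedian : String) (day : String) : Bool :=
  let daySlots : Int := ((assignment.filter (fun s => s.1 == day)).length : Int)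
  let week : Int := PySem.Dict.getD showCosts showType 0 +
    (assignment.filter (fun s => s.2.1 == comedian)).foldl
      (fun acc s => acc + PySem.Dict.getD showCosts s.2.2.2 0) 0
  let onDay : Int := PySem.Dict.getD showCosts showType 0 +
    (assignment.filter (fun s => s.2.1 == comedian && s.1 == day)).foldl
      (fun acc s => acc + PySem.Dict.getD showCosts s.2.2.2 0) 0
  decide (daySlots < 10) && decide (week ≤ 4) && decide (onDay ≤ 2)

-- ===== PRECONDITION & SPEC =====
-- Pre_ excludes exactly the show-type keys missing from showCosts (Python's KeyError):
-- A raises there unless an earlier threshold returns False first, and on those early-False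
-- inputs B itself raises KeyError (see the cite in claim.json).
def Pre_isConsistentTask2 (assignment : List (String × String × String × String)) (showType : String) (comedian : String) (day : String) : Prop :=
  (showType = "main" ∨ showType = "test") ∧
  ∀ s ∈ assignment, s.2.1 = comedian → (s.2.2.2 = "main" ∨ s.2.2.2 = "test")
instance (assignment : List (String × String × String × String)) (showType : String) (comedian : String) (day : String) : Decidable (Pre_isConsistentTask2 assignment showType comedian day) := by unfold Pre_isConsistentTask2; infer_instance

def pvWitness_isConsistentTask2 : (List (String × String × String × String)) × String × String × String :=
  ([("Mon", "alice", "slot1", "test")], "main", "alice", "Mon")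

def Spec_isConsistentTask2 (assignment : List (String × String × String × String)) (showType : String) (comedian : String) (day : String) (out : Bool) : Prop := out = isConsistentTask2_alt assignment showType comedian day
instance (assignment : List (String × String × String × String)) (showType : String) (comedian : String) (day : String) (out : Bool) : Decidable (Spec_isConsistentTask2 assignment showType comedian day out) := by unfold Spec_isConsistentTask2; infer_instance

-- ===== CLAIM (what is proved, stated in full; the proofs are below) =====
def Claim_equal_isConsistentTask2 : Prop := ∀ (assignment : List (String × String × String × String)) (showType : String) (comedian : String) (day : String), Dom_isConsistentTask2 assignment showType comedian day → Pre_isConsistentTask2 assignment showType comedian day → Spec_isConsistentTask2 assignment showType comedian day (isConsistentTask2 assignment showType comedian day)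

-- ===== LEMMAS AND PROOFS =====

-- closed (right-fold) forms of B's three aggregates, used as A's loop invariant
def cntD (day : String) (l : List (String × String × String × String)) : Int :=
  l.foldr (fun s acc => (if s.1 == day then 1 else 0) + acc) 0

def sumC (comedian : String) (l : List (String × String × String × String)) : Int :=
  l.foldr (fun s acc =>
    (if s.2.1 == comedian then PySem.Dict.getD showCosts s.2.2.2 0 else 0) + acc) 0

def sumCD (comedian day : String) (l : List (String × String × String × String)) : Int :=
  l.foldr (fun s acc =>
    (if s.2.1 == comedian && s.1 == day then PySem.Dict.getD showCosts s.2.2.2 0 else 0) + acc) 0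

lemma cost_nonneg (t : String) : 0 ≤ PySem.Dict.getD showCosts t 0 := by
  have h : showCosts.items = [("main", 2), ("test", 1)] := by decide
  cases hm : (("main" : String) == t) <;> cases ht : (("test" : String) == t) <;>
    simp [PySem.Dict.getD, PySem.Dict.get?, h, List.find?, hm, ht]

lemma cntD_nonneg (day : String) (l : List (String × String × String × String)) :
    0 ≤ cntD day l := by
  induction l with
  | nil => simp [cntD]
  | cons s r ih => simp only [cntD, List.foldr_cons] at *; split_ifs <;> omega

lemma sumC_nonneg (comedian : String) (l : List (String × String × String × String)) :
    0 ≤ sumC comedian l := by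
  induction l with
  | nil => simp [sumC]
  | cons s r ih =>
    simp only [sumC, List.foldr_cons] at *
    have := cost_nonneg s.2.2.2
    split_ifs <;> omega

lemma sumCD_nonneg (comedian day : String) (l : List (String × String × String × String)) :
    0 ≤ sumCD comedian day l := by
  induction l with
  | nil => simp [sumCD]
  | cons s r ih =>
    simp only [sumCD, List.foldr_cons] at *
    have := cost_nonneg s.2.2.2
    split_ifs <;> omega

lemma cntD_cons (day : String) (s : String × String × String × String)
    (r : List (String × String × String × String)) :
    cntD day (s :: r) = (if s.1 == day then 1 else 0) + cntD day r := rfl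

lemma sumC_cons (comedian : String) (s : String × String × String × String)
    (r : List (String × String × String × String)) :
    sumC comedian (s :: r) =
      (if s.2.1 == comedian then PySem.Dict.getD showCosts s.2.2.2 0 else 0) + sumC comedian r := rfl

lemma sumCD_cons (comedian day : String) (s : String × String × String × String)
    (r : List (String × String × String × String)) :
    sumCD comedian day (s :: r) =
      (if s.2.1 == comedian && s.1 == day then PySem.Dict.getD showCosts s.2.2.2 0 else 0) +
        sumCD comedian day r := rfl

lemma length_filter_cntD (day : String) (l : List (String × String × String × String)) :
    ((l.filter (fun s => s.1 == day)).length : Int) = cntD day l := by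
  induction l with
  | nil => simp [cntD]
  | cons s r ih =>
    by_cases h : s.1 = day <;> simp [List.filter_cons, h, cntD_cons, ← ih] <;> push_cast <;> ring

lemma foldl_sumC (comedian : String) (l : List (String × String × String × String)) (acc : Int) :
    (l.filter (fun s => s.2.1 == comedian)).foldl
      (fun acc s => acc + PySem.Dict.getD showCosts s.2.2.2 0) acc = acc + sumC comedian l := by
  induction l generalizing acc with
  | nil => simp [sumC]
  | cons s r ih =>
    by_cases h : s.2.1 = comedian <;> simp [List.filter_cons, h, sumC_cons, ih] <;> ring

lemma foldl_sumCD (comedian day : String) (l : List (String × String × String × String)) (acc : Int) :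
    (l.filter (fun s => s.2.1 == comedian && s.1 == day)).foldl
      (fun acc s => acc + PySem.Dict.getD showCosts s.2.2.2 0) acc = acc + sumCD comedian day l := by
  induction l generalizing acc with
  | nil => simp [sumCD]
  | cons s r ih =>
    by_cases h1 : s.2.1 = comedian <;> by_cases h2 : s.1 = day <;>
      simp [List.filter_cons, h1, h2, sumCD_cons, ih] <;> ring

-- under Pre_, A's early-exit loop is true iff all three final aggregates stay in bounds
lemma aLoop_true_iff (comedian day : String) (l : List (String × String × String × String))
    (spw spd mon : Int)
    (hpre : ∀ s ∈ l, s.2.1 = comedian → (s.2.2.2 = "main" ∨ s.2.2.2 = "test"))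
    (h1 : spw ≤ 4) (h2 : spd ≤ 2) (h3 : mon ≤ 9) :
    (aLoop comedian day l spw spd mon = true ↔
      mon + cntD day l ≤ 9 ∧ spw + sumC comedian l ≤ 4 ∧ spd + sumCD comedian day l ≤ 2) := by
  induction l generalizing spw spd mon with
  | nil => simp [aLoop, cntD, sumC, sumCD]; omega
  | cons s r ih =>
    have hpre' : ∀ t ∈ r, t.2.1 = comedian → (t.2.2.2 = "main" ∨ t.2.2.2 = "test") :=
      fun t ht => hpre t (List.mem_cons_of_mem _ ht)
    have hcnt := cntD_nonneg day r
    have hsc := sumC_nonneg comedian r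
    have hscd := sumCD_nonneg comedian day r
    cases hd : (s.1 == day) <;> cases hc : (s.2.1 == comedian)
    · simp only [aLoop, hd, hc, Bool.false_and, Bool.false_eq_true, if_false,
        cntD_cons, sumC_cons, sumCD_cons, Bool.and_false]
      rw [ih _ _ _ hpre' h1 h2 h3]; omega
    · rcases hpre s List.mem_cons_self (by simpa using hc) with hm | hm <;>
      · have hg : PySem.Dict.get? showCosts s.2.2.2 = some (PySem.Dict.getD showCosts s.2.2.2 0) := by
          rw [hm]; decide
        have hgv : (1 ≤ PySem.Dict.getD showCosts s.2.2.2 0 ∧ PySem.Dict.getD showCosts s.2.2.2 0 ≤ 2) := by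
          rw [hm]; decide
        simp only [aLoop, hd, hc, Bool.false_and, Bool.false_eq_true, if_false, if_true, hg,
          cntD_cons, sumC_cons, sumCD_cons, Bool.and_false]
        by_cases hw : spw + PySem.Dict.getD showCosts s.2.2.2 0 > 4
        · simp only [hw, if_true]
          constructor
          · intro h; exact absurd h (by simp)
          · intro ⟨_, hb, _⟩; omega
        · simp only [hw, if_false]
          rw [ih _ _ _ hpre' (by omega) h2 h3]; omega
    · simp only [aLoop, hd, hc, Bool.true_and, Bool.false_eq_true, if_false,
        cntD_cons, sumC_cons, sumCD_cons, Bool.and_true, Bool.false_and, if_true]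
      by_cases h10 : mon + 1 ≥ 10
      · simp only [h10, decide_true, if_true]
        constructor
        · intro h; exact absurd h (by simp)
        · intro ⟨ha, _, _⟩; omega
      · simp only [h10, decide_false, Bool.false_eq_true, if_false]
        rw [ih _ _ _ hpre' h1 h2 (by omega)]; omega
    · rcases hpre s List.mem_cons_self (by simpa using hc) with hm | hm <;>
      · have hg : PySem.Dict.get? showCosts s.2.2.2 = some (PySem.Dict.getD showCosts s.2.2.2 0) := by
          rw [hm]; decide
        have hgv : (1 ≤ PySem.Dict.getD showCosts s.2.2.2 0 ∧ PySem.Dict.getD showCosts s.2.2.2 0 ≤ 2) := by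
          rw [hm]; decide
        simp only [aLoop, hd, hc, Bool.true_and, if_true, hg,
          cntD_cons, sumC_cons, sumCD_cons, Bool.and_true]
        by_cases h10 : mon + 1 ≥ 10
        · simp only [h10, decide_true, if_true]
          constructor
          · intro h; exact absurd h (by simp)
          · intro ⟨ha, _, _⟩; omega
        · simp only [h10, decide_false, Bool.false_eq_true, if_false]
          by_cases hw : spw + PySem.Dict.getD showCosts s.2.2.2 0 > 4
          · simp only [hw, if_true]
            constructor
            · intro h; exact absurd h (by simp)
            · intro ⟨_, hb, _⟩; omega
          · simp only [hw, if_false]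
            by_cases hdd : spd + PySem.Dict.getD showCosts s.2.2.2 0 > 2
            · simp only [hdd, if_true]
              constructor
              · intro h; exact absurd h (by simp)
              · intro ⟨_, _, hcc⟩; omega
            · simp only [hdd, if_false]
              rw [ih _ _ _ hpre' (by omega) (by omega) (by omega)]; omega

lemma alt_true_iff (assignment : List (String × String × String × String))
    (showType comedian day : String) :
    (isConsistentTask2_alt assignment showType comedian day = true ↔
      cntD day assignment < 10 ∧
      PySem.Dict.getD showCosts showType 0 + sumC comedian assignment ≤ 4 ∧
      PySem.Dict.getD showCosts showType 0 + sumCD comedian day assignment ≤ 2) := by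
  simp only [isConsistentTask2_alt, length_filter_cntD, foldl_sumC, foldl_sumCD,
    Bool.and_eq_true, decide_eq_true_eq]
  omega

-- ===== VERDICT (by name: the statement is the Claim_ definition above) =====
theorem isConsistentTask2_spec : Claim_equal_isConsistentTask2 := by
  intro assignment showType comedian day _hdom hpre
  obtain ⟨hst, hsh⟩ := hpre
  unfold Spec_isConsistentTask2
  rw [Bool.eq_iff_iff, alt_true_iff]
  rcases hst with h | h
  · subst h
    have hg : PySem.Dict.get? showCosts "main" = some 2 := by decide
    have hgd : PySem.Dict.getD showCosts "main" 0 = 2 := by decide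
    simp only [isConsistentTask2, hg]
    rw [aLoop_true_iff _ _ _ _ _ _ hsh (by norm_num) (by norm_num) (by norm_num), hgd]
    omega
  · subst h
    have hg : PySem.Dict.get? showCosts "test" = some 1 := by decide
    have hgd : PySem.Dict.getD showCosts "test" 0 = 1 := by decide
    simp only [isConsistentTask2, hg]
    rw [aLoop_true_iff _ _ _ _ _ _ hsh (by norm_num) (by norm_num) (by norm_num), hgd]
    omega
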